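-- pv_equiv track=rewrite | github.com/HubertM6/MaturaMay2025Task1 | validators/validator.py | przestaw_ref
-- ===== SOURCE A (Python) =====
-- def przestaw_ref(n: int) -> int:
--     r = n % 100
--     a = r // 10
--     b = r % 10
--     n = n // 100
--     if n > 0:
--         return a + 10 * b + 100 * przestaw_ref(n)
--     else:
--         return a + 10 * b if a > 0 else b
-- ===== SOURCE B (Python) =====
-- def przestaw_ref(n: int) -> int:
--     # Stage 1: collect base-100 remainders, least significant first,
--     # stopping exactly when the quotient drops to <= 0 (as A does).
--     pairs = []
--     while True:
--         pairs.append(n % 100)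
--         n //= 100
--         if n <= 0:
--             break
--     # Stage 2: fold from the most significant pair down.
--     top = pairs[-1]
--     acc = top // 10 + 10 * (top % 10) if top // 10 > 0 else top % 10
--     for r in reversed(pairs[:-1]):
--         acc = acc * 100 + r // 10 + 10 * (r % 10)
--     return acc
-- ===== Notes on version B (the rewrite author's own statement) =====
-- stated objective: alternative
-- what changed: Replaces the recursion on the quotient by two staged passes: collect the base-100 remainders into a list, then fold the swapped pairs back-to-front from the most significant pair.
import Mathlib
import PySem

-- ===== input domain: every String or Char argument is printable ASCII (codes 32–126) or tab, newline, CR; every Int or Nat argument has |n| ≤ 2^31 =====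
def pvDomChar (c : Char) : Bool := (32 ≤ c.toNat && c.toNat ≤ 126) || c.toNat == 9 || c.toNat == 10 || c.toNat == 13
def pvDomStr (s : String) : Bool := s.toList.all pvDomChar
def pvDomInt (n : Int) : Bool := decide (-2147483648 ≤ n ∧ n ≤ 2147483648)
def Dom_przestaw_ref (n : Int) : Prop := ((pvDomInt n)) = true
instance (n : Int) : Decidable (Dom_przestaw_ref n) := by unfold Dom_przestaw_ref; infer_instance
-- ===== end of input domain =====

-- ===== PORT A =====
-- B differs from A by two staged passes (collect base-100 remainders, then fold swapped pairs back-to-front) instead of recursing on the quotient; same cost, return values proved equal below.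
def przestaw_ref (n : Int) : Int :=
  let r := PySem.Int.mod n 100
  let a := PySem.Int.floordiv r 10
  let b := PySem.Int.mod r 10
  let n2 := PySem.Int.floordiv n 100
  if n2 > 0 then a + 10 * b + 100 * przestaw_ref n2
  else if a > 0 then a + 10 * b else b
termination_by n.toNat
decreasing_by
  rename_i h
  simp only [n2, PySem.Int.floordiv_eq_ediv_of_pos (by omega : (0:Int) < 100)] at h ⊢
  omega

-- ===== PORT B =====
-- stage 1 of Source B: the while-True loop appending n % 100 until the quotient is ≤ 0
def pvCollect (n : Int) : List Int :=
  let n2 := PySem.Int.floordiv n 100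
  if n2 > 0 then PySem.Int.mod n 100 :: pvCollect n2 else [PySem.Int.mod n 100]
termination_by n.toNat
decreasing_by
  rename_i h
  simp only [n2, PySem.Int.floordiv_eq_ediv_of_pos (by omega : (0:Int) < 100)] at h ⊢
  omega

-- stage 2 of Source B: pairs[-1] seeds acc, then the for-loop over reversed(pairs[:-1])
def przestaw_ref_alt (n : Int) : Int :=
  match (pvCollect n).reverse with
  | [] => 0  -- unreachable: the collected list is never empty
  | top :: rest =>
      rest.foldl
        (fun acc r => acc * 100 + PySem.Int.floordiv r 10 + 10 * PySem.Int.mod r 10)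
        (if PySem.Int.floordiv top 10 > 0
         then PySem.Int.floordiv top 10 + 10 * PySem.Int.mod top 10
         else PySem.Int.mod top 10)

-- ===== PRECONDITION & SPEC =====
def Spec_przestaw_ref (n : Int) (out : Int) : Prop := out = przestaw_ref_alt n
instance (n : Int) (out : Int) : Decidable (Spec_przestaw_ref n out) := by unfold Spec_przestaw_ref; infer_instance

-- ===== CLAIM (what is proved, stated in full; the proofs are below) =====
def Claim_equal_przestaw_ref : Prop := ∀ (n : Int), Dom_przestaw_ref n → Spec_przestaw_ref n (przestaw_ref n)

-- ===== LEMMAS AND PROOFS =====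
theorem pvCollect_ne_nil (n : Int) : pvCollect n ≠ [] := by
  rw [pvCollect]; split <;> simp

theorem alt_eq (n : Int) : przestaw_ref_alt n = przestaw_ref n := by
  induction n using pvCollect.induct with
  | case1 n n2 h ih =>
    simp only [n2] at h ih
    rw [przestaw_ref_alt] at ih ⊢
    rw [pvCollect, if_pos h, przestaw_ref]
    simp only [if_pos h, List.reverse_cons]
    rcases hrev : (pvCollect (PySem.Int.floordiv n 100)).reverse with _ | ⟨top, rest⟩
    · exact absurd (List.reverse_eq_nil_iff.mp hrev) (pvCollect_ne_nil _)
    · rw [hrev] at ih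
      simp only [List.cons_append, List.foldl_append, List.foldl_cons, List.foldl_nil, ← ih]
      ring
  | case2 n n2 h =>
    simp only [n2] at h
    rw [przestaw_ref_alt, pvCollect, if_neg h, przestaw_ref]
    simp only [if_neg h, List.reverse_singleton, List.foldl_nil]

-- ===== VERDICT (by name: the statement is the Claim_ definition above) =====
theorem przestaw_ref_spec : Claim_equal_przestaw_ref := by
  intro n _
  unfold Spec_przestaw_ref
  exact (alt_eq n).symm
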